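-- pv_equiv track=rewrite | github.com/pypi-data/pypi-mirror-289 | packages/sus-amongus/sus_amongus-0.0.6.tar.gz/sus_amongus-0.0.6/src/sus_amongus/__init__.py | susify
-- ===== SOURCE A (Python) =====
-- def susify(text: str) -> str:
--     result = ''
--     for i in text:
--         if i != ' ' and i != '\n' and i != '\t':
--             result += 'ඞ'
--         else:
--             result += i
--     return result
-- ===== SOURCE B (Python) =====
-- import re
--
-- def susify(text: str) -> str:
--     # Single regex substitution instead of an explicit loop with concatenation.
--     return re.sub(r'[^ \n\t]', 'ඞ', text)
-- ===== Notes on version B (the rewrite author's own statement) =====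
-- stated objective: idiomatic
-- what changed: Replaced the explicit char loop with if/else and string concatenation by a single regex substitution over the negated character class [^ \n\t].
import Mathlib
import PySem

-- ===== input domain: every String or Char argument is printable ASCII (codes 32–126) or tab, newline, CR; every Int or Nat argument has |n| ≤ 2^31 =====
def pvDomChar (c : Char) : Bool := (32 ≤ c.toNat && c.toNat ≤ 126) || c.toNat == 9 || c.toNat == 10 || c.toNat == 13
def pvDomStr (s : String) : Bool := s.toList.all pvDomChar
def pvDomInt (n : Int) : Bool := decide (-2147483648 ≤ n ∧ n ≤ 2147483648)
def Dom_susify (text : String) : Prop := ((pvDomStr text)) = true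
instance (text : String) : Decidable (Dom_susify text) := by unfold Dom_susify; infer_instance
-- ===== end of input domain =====

-- ===== PORT A =====
-- A: loop over chars, appending 'ඞ' or the char itself to the accumulator
def susify (text : String) : String :=
  String.mk (text.toList.foldl
    (fun result i =>
      if i ≠ ' ' ∧ i ≠ '\n' ∧ i ≠ '\t' then result ++ ['ඞ'] else result ++ [i]) [])

-- ===== PORT B =====
-- B: single-pass substitution (regex sub over [^ \n\t]) = map each char
def susify_alt (text : String) : String :=
  String.mk (text.toList.map (fun c => if c = ' ' ∨ c = '\n' ∨ c = '\t' then c else 'ඞ'))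

-- ===== PRECONDITION & SPEC =====
def Spec_susify (text : String) (out : String) : Prop := out = susify_alt text
instance (text : String) (out : String) : Decidable (Spec_susify text out) := by unfold Spec_susify; infer_instance

-- ===== CLAIM (what is proved, stated in full; the proofs are below) =====
def Claim_equal_susify : Prop := ∀ (text : String), Dom_susify text → Spec_susify text (susify text)

-- ===== LEMMAS AND PROOFS =====

-- ===== VERDICT (by name: the statement is the Claim_ definition above) =====
theorem susify_foldl (l : List Char) (acc : List Char) :
    l.foldl
      (fun result i =>
        if i ≠ ' ' ∧ i ≠ '\n' ∧ i ≠ '\t' then result ++ ['ඞ'] else result ++ [i]) acc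
    = acc ++ l.map (fun c => if c = ' ' ∨ c = '\n' ∨ c = '\t' then c else 'ඞ') := by
  induction l generalizing acc with
  | nil => simp
  | cons h t ih =>
    simp only [List.foldl_cons, List.map_cons, ih]
    by_cases hs : h = ' ' <;> by_cases hn : h = '\n' <;> by_cases ht : h = '\t' <;>
      simp_all

theorem susify_spec : Claim_equal_susify := by
  intro text _
  unfold Spec_susify susify susify_alt
  rw [susify_foldl]
  simp
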